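-- pv_equiv track=rewrite | github.com/ttungl/Coding-Interview-Challenge | source-code/avrio-1.py | solution
-- ===== SOURCE A (Python) =====
-- def solution(S):
--     # write your code in Python 3.6
--     def searchCyc(S, p): # p= [-1,0,0,0,1,2,3]
--         tmp = S+S # tmp = byebyebyebye
--         res, i, j = -1, 0, 0
--         while i < len(tmp): # len(tmp) = 12
--             while j>=0 and S[j]!=tmp[i]: # [j=0, S[0]==tmp[0]]; [j=1,S[1]==tmp[1]; [j=5,S[5]==tmp[5]]; [j=3,S[3]==tmp[6]]; [S[4]==tmp[7]]; [S[5]==tmp[8]]; [S[3]==T[9]];...]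
--                 j = p[j]
--             i += 1 # i=1;2;6;7;8;9;10;11;12.
--             j += 1 # j=1;2;6;4;5;6;4;5;6.
--             if j == len(S): # [1!=6 ;2!=6; 6==6;4!=6;5!=6; 6==6;...;6==6]
--                 res += 1 # res=0; 1; 2.
--                 j = p[j] # j=p[6]=3; j=3; 3
--         return res # 2
--
--     p = [0]*(len(S)+1) # DP-1
--     i, j, p[0] = 0, -1, -1 # [-1, 0, 0, 0, 0, 0, 0]
--     while i < len(S): #
--         while j>=0 and S[j] != S[i]: # [j=0, S[0]!=S[1]]; [j=0, S[0]!=S[2]]; [j=0, S[0]==S[3]]; [j=1, S[1]==S[4]]; [j=2, S[2]==S[5]];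
--             j = p[j] # j=-1;-1;
--         i += 1 # i=1;2;3;4;5;6;
--         j += 1 # j=0;0;0;1;2;3;
--         p[i] = j # p[1]=0;p[2]=0;p[3]=0;p[4]=1;p[5]=2;p[6]=3;
--
--     return searchCyc(S, p)
--
--
--     pass
-- ===== SOURCE B (Python) =====
-- def solution(S):
--     # Count the rotations k in 1..len(S) that map S to itself (empty string: -1, as specified).
--     if not S:
--         return -1
--     n = len(S)
--     return sum(1 for k in range(1, n + 1) if S[k:] + S[:k] == S)
-- ===== Notes on version B (the rewrite author's own statement) =====
-- stated objective: simpler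
-- what changed: A computes the KMP prefix function and then runs a second KMP scan over S+S counting matches; B drops both loops and directly counts the rotations k in 1..len(S) that map S to itself (empty string stays -1 as A returns).
import Mathlib
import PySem

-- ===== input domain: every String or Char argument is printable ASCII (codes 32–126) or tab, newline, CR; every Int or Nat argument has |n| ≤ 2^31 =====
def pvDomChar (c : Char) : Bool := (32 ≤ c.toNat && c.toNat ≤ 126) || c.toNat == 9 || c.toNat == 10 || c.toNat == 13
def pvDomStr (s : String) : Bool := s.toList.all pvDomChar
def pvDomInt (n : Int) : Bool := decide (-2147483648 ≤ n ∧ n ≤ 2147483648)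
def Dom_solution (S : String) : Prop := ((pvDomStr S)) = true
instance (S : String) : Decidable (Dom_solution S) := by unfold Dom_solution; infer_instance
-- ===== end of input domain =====

-- B replaces A's second KMP scan over S+S by directly counting the rotations k ∈ [1, len(S)]
-- that map S to itself (objective: simpler; B is quadratic where A is linear — no speed claim).

-- ===== PORT A =====
-- inner loop 'while j>=0 and S[j]!=c: j = p[j]' of both phases; the fuel is a static bound on
-- the strictly decreasing chain j > p[j] > …, never exhausted on the states A's loops reach
def kmpFall (s : List Char) (p : List Int) (c : Char) : Int → Nat → Int
  | j, 0 => j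
  | j, fuel+1 =>
    if 0 ≤ j ∧ PySem.List.pyGetD s j ' ' ≠ c then
      kmpFall s p c (PySem.List.pyGetD p j 0) fuel
    else j

-- the prefix-function loop: r iterations remain, current index i, state (p, j)
def prefLoop (s : List Char) : Nat → Nat → List Int → Int → List Int
  | _, 0, p, _ => p
  | i, r+1, p, j =>
    let j1 := kmpFall s p (PySem.List.pyGetD s (i : Int) ' ') j (s.length + 2) + 1
    prefLoop s (i+1) r (p.set (i+1) j1) j1

-- searchCyc's scan loop over tmp = S+S: r iterations remain, current index i, state (j, res)
def scanLoop (s : List Char) (p : List Int) (tmp : List Char) : Nat → Nat → Int → Int → Int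
  | _, 0, _, res => res
  | i, r+1, j, res =>
    let j1 := kmpFall s p (PySem.List.pyGetD tmp (i : Int) ' ') j (s.length + 2) + 1
    if j1 = (s.length : Int) then
      scanLoop s p tmp (i+1) r (PySem.List.pyGetD p (s.length : Int) 0) (res + 1)
    else
      scanLoop s p tmp (i+1) r j1 res

def solution (S : String) : Int :=
  let s := S.toList
  let n := s.length
  let p := prefLoop s 0 n ((List.replicate (n+1) (0 : Int)).set 0 (-1)) (-1)
  scanLoop s p (s ++ s) 0 (2*n) 0 (-1)

-- ===== PORT B =====
def solution_alt (S : String) : Int :=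
  let s := S.toList
  let n := s.length
  if s = [] then -1
  else ((PySem.List.pyRange 1 ((n : Int) + 1) 1).filter
          (fun k => PySem.List.slice s (some k) none ++ PySem.List.slice s none (some k) == s)).length

-- ===== PRECONDITION & SPEC =====
def Spec_solution (S : String) (out : Int) : Prop := out = solution_alt S
instance (S : String) (out : Int) : Decidable (Spec_solution S out) := by unfold Spec_solution; infer_instance

-- ===== CLAIM (what is proved, stated in full; the proofs are below) =====
def Claim_equal_solution : Prop := ∀ (S : String), Dom_solution S → Spec_solution S (solution S)

-- ===== LEMMAS AND PROOFS =====

-- `s.take l` is a suffix of `t.take i`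
def sufB (s t : List Char) (l i : Nat) : Bool := decide (l ≤ i) && (s.take l == (t.take i).drop (i - l))

-- candidate for the inner loop: l is a valid fall-back state whose next character is c
def chB (s t : List Char) (i : Nat) (c : Char) (l : Nat) : Bool :=
  sufB s t l i && decide (l < s.length) && (s.getD l ' ' == c)

-- greatest l ≤ j with P l, assuming P 0 (else 0)
def bestN (P : Nat → Bool) : Nat → Nat
  | 0 => 0
  | j+1 => if P (j+1) then j+1 else bestN P j

-- greatest l ≤ j with P l, as an Int, -1 if none
def bestB (P : Nat → Bool) : Nat → Int
  | 0 => if P 0 then 0 else -1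
  | j+1 => if P (j+1) then ((j : Int) + 1) else bestB P j

-- value A's prefix loop stores at p[i]
def pSpec (s : List Char) (i : Nat) : Int :=
  if i = 0 then -1 else (bestN (fun l => sufB s s l i) (i-1) : Int)

-- number of full matches of s ending in positions 1..i of t
def mCount (s t : List Char) (i : Nat) : Nat :=
  (List.range i).countP (fun e => sufB s t s.length (e+1))

lemma sufB_zero (s t : List Char) (i : Nat) : sufB s t 0 i = true := by
  simp [sufB]


lemma sufB_le {s t : List Char} {l i : Nat} (h : sufB s t l i = true) : l ≤ i := by
  simp only [sufB, Bool.and_eq_true, decide_eq_true_eq] at h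
  exact h.1

lemma sufB_eq {s t : List Char} {l i : Nat} (h : sufB s t l i = true) :
    s.take l = (t.take i).drop (i - l) := by
  simp only [sufB, Bool.and_eq_true, decide_eq_true_eq, beq_iff_eq] at h
  exact h.2

lemma sufB_intro {s t : List Char} {l i : Nat} (h1 : l ≤ i)
    (h2 : s.take l = (t.take i).drop (i - l)) : sufB s t l i = true := by
  simp [sufB, h1, h2]

-- K1: nested suffixes are borders
lemma suf_trans_up {s t : List Char} {a b i : Nat} (ha : sufB s t a i = true)
    (hb : sufB s t b i = true) (hab : a ≤ b) : sufB s s a b = true := by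
  have hbi := sufB_le hb
  apply sufB_intro hab
  rw [sufB_eq hb, List.drop_drop, show i - b + (b - a) = i - a from by omega]
  exact sufB_eq ha

-- K2: a border of a suffix is a suffix
lemma suf_comp {s t : List Char} {a b i : Nat} (h1 : sufB s s a b = true)
    (h2 : sufB s t b i = true) : sufB s t a i = true := by
  have hab := sufB_le h1
  have hbi := sufB_le h2
  apply sufB_intro (le_trans hab hbi)
  rw [sufB_eq h1, sufB_eq h2, List.drop_drop, show i - b + (b - a) = i - a from by omega]

-- K3: extending a suffix match by one character
lemma suf_ext {s t : List Char} {l i : Nat} (hl : l < s.length) (hi : i < t.length) :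
    sufB s t (l+1) (i+1) = true ↔ (sufB s t l i = true ∧ s.getD l ' ' = t.getD i ' ') := by
  have hs : s.take (l+1) = s.take l ++ [s.getD l ' '] := by
    rw [List.take_add_one, List.getElem?_eq_getElem hl, List.getD_eq_getElem _ _ hl]; rfl
  have ht : t.take (i+1) = t.take i ++ [t.getD i ' '] := by
    rw [List.take_add_one, List.getElem?_eq_getElem hi, List.getD_eq_getElem _ _ hi]; rfl
  constructor
  · intro h
    have h1 : l ≤ i := by have := sufB_le h; omega
    have h2 := sufB_eq h
    rw [hs, ht, show i + 1 - (l + 1) = i - l from by omega,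
        List.drop_append_of_le_length (by simp [List.length_take]; omega)] at h2
    rw [← List.concat_eq_append, ← List.concat_eq_append, List.concat_inj] at h2
    exact ⟨sufB_intro h1 h2.1, h2.2⟩
  · rintro ⟨h, hc⟩
    have h1 := sufB_le h
    apply sufB_intro (by omega)
    rw [hs, ht, show i + 1 - (l + 1) = i - l from by omega,
        List.drop_append_of_le_length (by simp [List.length_take]; omega),
        ← sufB_eq h, hc]

lemma bestN_le (P : Nat → Bool) (j : Nat) : bestN P j ≤ j := by
  induction j with
  | zero => simp [bestN]
  | succ m ih => rw [bestN]; split <;> omega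

lemma bestN_spec (P : Nat → Bool) (j : Nat) (h0 : P 0 = true) : P (bestN P j) = true := by
  induction j with
  | zero => simpa [bestN] using h0
  | succ m ih => rw [bestN]; split <;> [assumption; exact ih]

lemma bestN_max {P : Nat → Bool} {l j : Nat} (hl : l ≤ j) (h : P l = true) : l ≤ bestN P j := by
  induction j with
  | zero => omega
  | succ m ih =>
    rw [bestN]
    rcases Nat.eq_or_lt_of_le hl with rfl | hlt
    · simp [h]
    · split
      · omega
      · exact ih (by omega)

lemma bestN_congr {P Q : Nat → Bool} (j : Nat) (h : ∀ l, l ≤ j → P l = Q l) :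
    bestN P j = bestN Q j := by
  induction j with
  | zero => rfl
  | succ m ih =>
    rw [bestN, bestN, h (m+1) le_rfl, ih (fun l hl => h l (by omega))]

lemma bestN_eq_zero {P : Nat → Bool} (j : Nat) (h : ∀ l, 1 ≤ l → l ≤ j → P l = false) :
    bestN P j = 0 := by
  induction j with
  | zero => rfl
  | succ m ih =>
    rw [bestN, if_neg (by simp [h (m+1) (by omega) le_rfl])]
    exact ih (fun l h1 h2 => h l h1 (by omega))

lemma bestB_spec {P : Nat → Bool} {j g : Nat} (h : bestB P j = (g : Int)) : P g = true := by
  induction j with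
  | zero =>
    rw [bestB] at h
    split at h
    · obtain rfl : g = 0 := by omega
      assumption
    · omega
  | succ m ih =>
    rw [bestB] at h
    split at h
    · obtain rfl : g = m + 1 := by omega
      assumption
    · exact ih h

lemma bestB_max {P : Nat → Bool} {l j : Nat} (hl : l ≤ j) (h : P l = true) :
    (l : Int) ≤ bestB P j := by
  induction j with
  | zero =>
    obtain rfl : l = 0 := by omega
    rw [bestB, if_pos h]; norm_num
  | succ m ih =>
    rw [bestB]
    rcases Nat.eq_or_lt_of_le hl with rfl | hlt
    · rw [if_pos h]; push_cast; omega
    · split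
      · omega
      · exact ih (by omega)

lemma bestB_agree {P : Nat → Bool} {a b : Nat} (hba : b ≤ a)
    (h : ∀ l, l ≤ a → P l = true → l ≤ b) : bestB P a = bestB P b := by
  induction a with
  | zero =>
    obtain rfl : b = 0 := by omega
    rfl
  | succ m ih =>
    rcases Nat.eq_or_lt_of_le hba with rfl | hlt
    · rfl
    · have hP : P (m+1) = false := by
        cases hPm : P (m+1)
        · rfl
        · have := h (m+1) le_rfl hPm; omega
      rw [bestB, if_neg (by simp [hP])]
      exact ih (by omega) (fun l hl hPl => h l (by omega) hPl)

lemma bestB_cases (P : Nat → Bool) (j : Nat) :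
    bestB P j = -1 ∨ ∃ g : Nat, bestB P j = (g : Int) ∧ g ≤ j := by
  induction j with
  | zero =>
    rw [bestB]; split
    · exact Or.inr ⟨0, rfl, le_rfl⟩
    · exact Or.inl rfl
  | succ m ih =>
    rw [bestB]; split
    · exact Or.inr ⟨m+1, by push_cast; ring, le_rfl⟩
    · rcases ih with h | ⟨g, hg, hgle⟩
      · exact Or.inl h
      · exact Or.inr ⟨g, hg, by omega⟩

lemma kmpFall_neg (s : List Char) (p : List Int) (c : Char) (j : Int) (fuel : Nat)
    (hj : j < 0) : kmpFall s p c j fuel = j := by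
  cases fuel with
  | zero => rfl
  | succ f => rw [kmpFall, if_neg]; rintro ⟨h0, -⟩; omega

-- the inner loop computes the best candidate along the failure chain
lemma kmpFall_eq (s t : List Char) (p : List Int) (c : Char) (i : Nat) :
    ∀ jn fuel, jn + 2 ≤ fuel → jn < s.length → sufB s t jn i = true →
      (∀ k, k ≤ jn → PySem.List.pyGetD p (k : Int) 0 = pSpec s k) →
      kmpFall s p c (jn : Int) fuel = bestB (chB s t i c) jn := by
  intro jn
  induction jn using Nat.strong_induction_on with
  | _ jn IH =>
  intro fuel hfuel hjn hsuf hp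
  obtain ⟨f, rfl⟩ : ∃ f, fuel = f + 1 := ⟨fuel - 1, by omega⟩
  rw [kmpFall]
  have hget : PySem.List.pyGetD s ((jn : Nat) : Int) ' ' = s.getD jn ' ' :=
    PySem.List.pyGetD_natCast s jn ' '
  by_cases hc : s.getD jn ' ' = c
  · rw [if_neg (by rw [hget, hc]; simp)]
    have hch : chB s t i c jn = true := by
      simp only [chB, Bool.and_eq_true, decide_eq_true_eq, beq_iff_eq]
      exact ⟨⟨hsuf, hjn⟩, hc⟩
    cases jn with
    | zero => simp [bestB, hch]
    | succ m => rw [bestB, if_pos hch]; push_cast; ring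
  · rw [if_pos ⟨Int.natCast_nonneg jn, by rw [hget]; exact hc⟩]
    rw [hp jn le_rfl]
    have hchn : chB s t i c jn = false := by
      cases h : chB s t i c jn
      · rfl
      · simp only [chB, Bool.and_eq_true, beq_iff_eq] at h
        exact absurd h.2 hc
    cases Nat.eq_zero_or_pos jn with
    | inl h0 =>
      subst h0
      rw [pSpec, if_pos rfl, kmpFall_neg _ _ _ _ _ (by norm_num), bestB, if_neg (by simp [hchn])]
    | inr hpos =>
      rw [pSpec, if_neg (by omega)]
      have hble : bestN (fun l => sufB s s l jn) (jn - 1) ≤ jn - 1 := bestN_le _ _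
      have hbsuf : sufB s s (bestN (fun l => sufB s s l jn) (jn - 1)) jn = true :=
        bestN_spec (fun l => sufB s s l jn) (jn - 1) (sufB_zero s s jn)
      have hQb : sufB s t (bestN (fun l => sufB s s l jn) (jn - 1)) i = true :=
        suf_comp hbsuf hsuf
      rw [IH _ (by omega) f (by omega) (by omega) hQb (fun k hk => hp k (by omega))]
      refine (bestB_agree (by omega) (fun l hl hPl => ?_)).symm
      have hlj : l ≠ jn := by
        intro e; rw [← e, hPl] at hchn; cases hchn
      have hsl : sufB s t l i = true := by
        simp only [chB, Bool.and_eq_true] at hPl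
        exact hPl.1.1
      exact bestN_max (by omega) (suf_trans_up hsl hsuf (by omega))

-- ADV: one step of either outer loop advances the best suffix-match length
lemma advance (s t : List Char) (i cap : Nat) (hi : i < t.length) (hcap : cap + 1 ≤ s.length) :
    bestB (chB s t i (t.getD i ' ')) (bestN (fun l => sufB s t l i) cap) + 1 =
      (bestN (fun l => sufB s t l (i+1)) (cap+1) : Int) := by
  set c := t.getD i ' ' with hc
  set jn := bestN (fun l => sufB s t l i) cap with hjn
  have hjncap : jn ≤ cap := bestN_le _ _
  -- any nonzero suffix-match at i+1 comes from a candidate at i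
  have back : ∀ m, m ≤ cap + 1 → 1 ≤ m → sufB s t m (i+1) = true →
      chB s t i c (m-1) = true ∧ m - 1 ≤ jn := by
    intro m hm h1 hsm
    obtain ⟨l, rfl⟩ : ∃ l, m = l + 1 := ⟨m - 1, by omega⟩
    have hls : l < s.length := by omega
    have := (suf_ext hls hi).mp hsm
    refine ⟨by
      simp only [chB, Bool.and_eq_true, decide_eq_true_eq, beq_iff_eq]
      exact ⟨⟨this.1, hls⟩, this.2⟩, ?_⟩
    simp only [Nat.add_sub_cancel]
    exact bestN_max (by omega) this.1
  rcases bestB_cases (chB s t i c) jn with hB | ⟨g, hB, hgle⟩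
  · rw [hB]
    have h0 : bestN (fun l => sufB s t l (i+1)) (cap+1) = 0 := by
      apply bestN_eq_zero
      intro l h1 h2
      cases hl : sufB s t l (i+1)
      · rfl
      · obtain ⟨hch, hle⟩ := back l h2 h1 hl
        have := bestB_max hle hch
        rw [hB] at this
        omega
    rw [h0]; norm_num
  · rw [hB]
    have hchg := bestB_spec hB
    have hg1 : g < s.length := by
      simp only [chB, Bool.and_eq_true, decide_eq_true_eq] at hchg
      exact hchg.1.2
    have hgsuf : sufB s t g i = true := by
      simp only [chB, Bool.and_eq_true] at hchg
      exact hchg.1.1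
    have hgc : s.getD g ' ' = c := by
      simp only [chB, Bool.and_eq_true, beq_iff_eq] at hchg
      exact hchg.2
    have hstep : sufB s t (g+1) (i+1) = true := (suf_ext hg1 hi).mpr ⟨hgsuf, hgc⟩
    have h1 : g + 1 ≤ bestN (fun l => sufB s t l (i+1)) (cap+1) :=
      bestN_max (by omega) hstep
    have h2 : bestN (fun l => sufB s t l (i+1)) (cap+1) ≤ g + 1 := by
      set m := bestN (fun l => sufB s t l (i+1)) (cap+1) with hm
      have hmc : m ≤ cap + 1 := bestN_le _ _
      have hms : sufB s t m (i+1) = true :=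
        bestN_spec (fun l => sufB s t l (i+1)) (cap+1) (sufB_zero s t (i+1))
      cases Nat.eq_zero_or_pos m with
      | inl h => omega
      | inr h =>
        obtain ⟨hch, hle⟩ := back m hmc h hms
        have := bestB_max hle hch
        rw [hB] at this
        omega
    have : bestN (fun l => sufB s t l (i+1)) (cap+1) = g + 1 := by omega
    rw [this]; push_cast; ring

-- RESET: after a full match, p[n] is again the best proper suffix-match length
lemma reset (s t : List Char) (i : Nat) (hn : 1 ≤ s.length)
    (h : sufB s t s.length (i+1) = true) :
    bestN (fun l => sufB s s l s.length) (s.length - 1) =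
      bestN (fun l => sufB s t l (i+1)) (s.length - 1) := by
  apply bestN_congr
  intro l hl
  rw [Bool.eq_iff_iff]
  constructor
  · intro h1; exact suf_comp h1 h
  · intro h1; exact suf_trans_up h1 h (by omega)

lemma bestN_cap_drop {P : Nat → Bool} {j : Nat} (h : bestN P (j+1) ≠ j+1) :
    bestN P (j+1) = bestN P j := by
  rw [bestN]
  split
  · rw [bestN, if_pos ‹_›] at h; omega
  · rfl

lemma mCount_succ (s t : List Char) (i : Nat) :
    mCount s t (i+1) = mCount s t i + (if sufB s t s.length (i+1) = true then 1 else 0) := by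
  rw [mCount, mCount, List.range_succ, List.countP_append]
  simp [List.countP_cons]

-- phase 1: the prefix loop computes pSpec
lemma prefLoop_ok (s : List Char) :
    ∀ r i p j, i + r = s.length → p.length = s.length + 1 →
      (∀ k, k ≤ i → PySem.List.pyGetD p (k : Int) 0 = pSpec s k) → j = pSpec s i →
      (prefLoop s i r p j).length = s.length + 1 ∧
        ∀ k, k ≤ s.length → PySem.List.pyGetD (prefLoop s i r p j) (k : Int) 0 = pSpec s k := by
  intro r
  induction r with
  | zero =>
    intro i p j hi hlen hp hj
    rw [prefLoop]
    exact ⟨hlen, fun k hk => hp k (by omega)⟩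
  | succ r ih =>
    intro i p j hi hlen hp hj
    rw [prefLoop]
    have hilt : i < s.length := by omega
    have hgetc : PySem.List.pyGetD s (i : Int) ' ' = s.getD i ' ' :=
      PySem.List.pyGetD_natCast s i ' '
    have hj1 : kmpFall s p (PySem.List.pyGetD s (i : Int) ' ') j (s.length+2) + 1 = pSpec s (i+1) := by
      cases Nat.eq_zero_or_pos i with
      | inl h0 =>
        subst h0
        rw [hj, pSpec, if_pos rfl, kmpFall_neg _ _ _ _ _ (by norm_num),
          pSpec, if_neg (by omega)]
        norm_num [bestN]
      | inr hpos =>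
        rw [hj, pSpec, if_neg (by omega), hgetc,
          kmpFall_eq s s p (s.getD i ' ') i (bestN (fun l => sufB s s l i) (i-1)) (s.length+2)
            (by have := bestN_le (fun l => sufB s s l i) (i-1); omega)
            (by have := bestN_le (fun l => sufB s s l i) (i-1); omega)
            (bestN_spec (fun l => sufB s s l i) (i-1) (sufB_zero s s i))
            (fun k hk => hp k (by have := bestN_le (fun l => sufB s s l i) (i-1); omega))]
        have hadv := advance s s i (i-1) hilt (by omega)
        rw [show i - 1 + 1 = i from by omega] at hadv
        rw [hadv, pSpec, if_neg (by omega), Nat.add_sub_cancel]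
    rw [hj1]
    apply ih (i+1) _ _ (by omega) (by simp [hlen])
    · intro k hk
      rw [PySem.List.pyGetD_natCast, List.getD_eq_getElem?_getD, List.getElem?_set]
      rcases eq_or_ne (i+1) k with rfl | hne
      · rw [if_pos rfl, if_pos (by omega)]
        rfl
      · rw [if_neg hne]
        have hold := hp k (by omega)
        rw [PySem.List.pyGetD_natCast, List.getD_eq_getElem?_getD] at hold
        exact hold
    · rfl

-- phase 2: the scan loop counts matches
lemma scanLoop_ok (s : List Char) (p : List Int) (hn : 1 ≤ s.length)
    (hp : ∀ k, k ≤ s.length → PySem.List.pyGetD p (k : Int) 0 = pSpec s k) :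
    ∀ r i j res, i + r = 2 * s.length →
      j = (bestN (fun l => sufB s (s ++ s) l i) (s.length - 1) : Int) →
      res = (mCount s (s ++ s) i : Int) - 1 →
      scanLoop s p (s ++ s) i r j res = (mCount s (s ++ s) (2 * s.length) : Int) - 1 := by
  intro r
  induction r with
  | zero =>
    intro i j res hi hj hres
    rw [scanLoop, hres, show i = 2 * s.length from by omega]
  | succ r ih =>
    intro i j res hi hj hres
    rw [scanLoop]
    have hilt : i < (s ++ s).length := by simp [List.length_append]; omega
    have hgetc : PySem.List.pyGetD (s ++ s) (i : Int) ' ' = (s ++ s).getD i ' ' :=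
      PySem.List.pyGetD_natCast (s ++ s) i ' '
    have hcaple : bestN (fun l => sufB s (s ++ s) l i) (s.length - 1) ≤ s.length - 1 :=
      bestN_le _ _
    have hkf : kmpFall s p (PySem.List.pyGetD (s ++ s) (i : Int) ' ') j (s.length+2) + 1 =
        (bestN (fun l => sufB s (s ++ s) l (i+1)) (s.length) : Int) := by
      rw [hj, hgetc,
        kmpFall_eq s (s ++ s) p ((s ++ s).getD i ' ') i
          (bestN (fun l => sufB s (s ++ s) l i) (s.length - 1)) (s.length+2)
          (by omega) (by omega)
          (bestN_spec (fun l => sufB s (s ++ s) l i) (s.length - 1) (sufB_zero s (s ++ s) i))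
          (fun k hk => hp k (by omega))]
      have hadv := advance s (s ++ s) i (s.length - 1) hilt (by omega)
      rw [show s.length - 1 + 1 = s.length from by omega] at hadv
      exact hadv
    rw [hkf]
    by_cases hM : bestN (fun l => sufB s (s ++ s) l (i+1)) (s.length) = s.length
    · rw [if_pos (by rw [hM])]
      have hmatch : sufB s (s ++ s) s.length (i+1) = true := by
        have := bestN_spec (fun l => sufB s (s ++ s) l (i+1)) (s.length)
          (sufB_zero s (s ++ s) (i+1))
        rwa [hM] at this
      apply ih (i+1) _ _ (by omega)
      · rw [hp s.length le_rfl, pSpec, if_neg (by omega)]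
        exact congrArg _ (reset s (s ++ s) i hn hmatch)
      · rw [hres, mCount_succ, if_pos hmatch]
        push_cast
        ring
    · rw [if_neg (by
        intro h
        apply hM
        have := bestN_le (fun l => sufB s (s ++ s) l (i+1)) (s.length)
        omega)]
      apply ih (i+1) _ _ (by omega)
      · have hd : bestN (fun l => sufB s (s ++ s) l (i+1)) s.length
            = bestN (fun l => sufB s (s ++ s) l (i+1)) (s.length - 1) := by
          have h2 := bestN_cap_drop (P := fun l => sufB s (s ++ s) l (i+1)) (j := s.length - 1)
            (by rw [show s.length - 1 + 1 = s.length from by omega]; exact hM)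
          rw [show s.length - 1 + 1 = s.length from by omega] at h2
          exact h2
        rw [hd]
      · have hnot : sufB s (s ++ s) s.length (i+1) = false := by
          cases h : sufB s (s ++ s) s.length (i+1)
          · rfl
          · have := bestN_max (P := fun l => sufB s (s ++ s) l (i+1)) (le_refl s.length) h
            have := bestN_le (fun l => sufB s (s ++ s) l (i+1)) (s.length)
            omega
        rw [hres, mCount_succ, if_neg (by rw [hnot]; simp)]
        push_cast
        ring

-- the rotation characterisation of a full match ending at position n+k
lemma rot_char (s : List Char) (k : Nat) (hk : k ≤ s.length) :
    sufB s (s ++ s) s.length (s.length + k) = (s.drop k ++ s.take k == s) := by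
  rw [Bool.eq_iff_iff, beq_iff_eq]
  have ht : (s ++ s).take (s.length + k) = s ++ s.take k := by
    rw [List.take_append, List.take_of_length_le (by omega), Nat.add_sub_cancel_left]
  have hd : (s ++ s.take k).drop (s.length + k - s.length) = s.drop k ++ s.take k := by
    rw [Nat.add_sub_cancel_left, List.drop_append_of_le_length (by omega)]
  constructor
  · intro h
    have h2 := sufB_eq h
    rw [List.take_length, ht, hd] at h2
    exact h2.symm
  · intro h
    apply sufB_intro (by omega)
    rw [List.take_length, ht, hd]
    exact h.symm

-- the final count is B's rotation count plus one
lemma mCount_eq (s : List Char) (hn : 1 ≤ s.length) :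
    mCount s (s ++ s) (2 * s.length) =
      1 + (List.range s.length).countP (fun k => s.drop (1+k) ++ s.take (1+k) == s) := by
  rw [mCount, show 2 * s.length = (s.length - 1) + (s.length + 1) from by omega,
    List.range_add, List.countP_append]
  have h1 : (List.range (s.length - 1)).countP (fun e => sufB s (s ++ s) s.length (e+1)) = 0 := by
    rw [List.countP_eq_zero]
    intro e he
    rw [List.mem_range] at he
    intro h
    have := sufB_le h
    omega
  rw [h1, List.countP_map]
  have h2 : List.countP ((fun e => sufB s (s ++ s) s.length (e+1)) ∘
        (fun x => (s.length - 1) + x)) (List.range (s.length + 1))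
      = List.countP (fun x => s.drop x ++ s.take x == s) (List.range (s.length + 1)) := by
    apply List.countP_congr
    intro x hx
    rw [List.mem_range] at hx
    simp only [Function.comp]
    rw [show s.length - 1 + x + 1 = s.length + x from by omega, rot_char s x (by omega)]
  rw [h2, show s.length + 1 = 1 + s.length from by omega, List.range_add, List.countP_append]
  have h3 : List.countP (fun x => s.drop x ++ s.take x == s) (List.range 1) = 1 := by
    simp [List.range_succ]
  rw [h3, List.countP_map]
  have h4 : List.countP ((fun x => s.drop x ++ s.take x == s) ∘ (fun x => 1 + x))
        (List.range s.length)
      = List.countP (fun k => s.drop (1+k) ++ s.take (1+k) == s) (List.range s.length) :=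
    List.countP_congr (fun x _ => Iff.rfl)
  rw [h4]
  omega

-- B's filter, rewritten over List.range
lemma alt_count (s : List Char) :
    ((PySem.List.pyRange 1 ((s.length : Int) + 1) 1).filter
        (fun k => PySem.List.slice s (some k) none ++ PySem.List.slice s none (some k) == s)).length =
      (List.range s.length).countP (fun k => s.drop (1+k) ++ s.take (1+k) == s) := by
  rw [PySem.List.pyRange_one,
    show ((s.length : Int) + 1 - 1).toNat = s.length from by simp,
    ← List.countP_eq_length_filter, List.countP_map]
  apply List.countP_congr
  intro x hx
  rw [List.mem_range] at hx
  simp only [Function.comp]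
  rw [show (1 : Int) + (x : Nat) = ((1 + x : Nat) : Int) from by push_cast; ring,
    PySem.List.slice_from_natCast, PySem.List.slice_to_natCast]

-- ===== VERDICT (by name: the statement is the Claim_ definition above) =====
theorem solution_spec : Claim_equal_solution := by
  unfold Claim_equal_solution
  intro S _
  unfold Spec_solution
  rcases eq_or_ne S.toList [] with hs | hs
  · simp only [solution, solution_alt, hs]
    norm_num [scanLoop]
  · have hn : 1 ≤ S.toList.length := by
      have := List.length_pos_iff.mpr hs
      omega
    simp only [solution, solution_alt, if_neg hs]
    obtain ⟨hplen, hpok⟩ := prefLoop_ok S.toList S.toList.length 0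
      ((List.replicate (S.toList.length + 1) (0 : Int)).set 0 (-1)) (-1)
      (by omega) (by simp)
      (by
        intro k hk
        obtain rfl : k = 0 := by omega
        rw [PySem.List.pyGetD_natCast, List.getD_eq_getElem?_getD, List.getElem?_set,
          if_pos rfl, if_pos (by simp), pSpec, if_pos rfl]
        rfl)
      (by rw [pSpec, if_pos rfl])
    rw [scanLoop_ok S.toList _ hn hpok (2 * S.toList.length) 0 0 (-1) (by omega)
      (by
        rw [bestN_eq_zero (S.toList.length - 1) (fun l h1 h2 => by
          cases h : sufB S.toList (S.toList ++ S.toList) l 0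
          · rfl
          · have := sufB_le h; omega)]
        rfl)
      (by rw [mCount]; simp)]
    rw [mCount_eq S.toList hn, alt_count S.toList]
    push_cast
    ring
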